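-- pv_equiv track=rewrite | github.com/szf963852/2017A2CS | ch25/recursion- Godfrey.py | parenBit
-- ===== SOURCE A (Python) =====
-- def parenBit(n):
--     if n[0]=="("and n[-1]==")":
--         return n
--     else:
--         if n[0]!="(":
--             return parenBit(n[1:])
--         if n[-1]!=")":
--             return parenBit(n[:-1])
-- ===== SOURCE B (Python) =====
-- def parenBit(n):
--     # One forward pass: record the first '(' and the last ')' index, then slice once.
--     first = last = -1
--     for k, c in enumerate(n):
--         if c == '(' and first < 0:
--             first = k
--         if c == ')':
--             last = k
--     if first < 0 or last <= first:
--         raise IndexError("no '(' ... ')' segment")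
--     return n[first:last + 1]
-- ===== Notes on version B (the rewrite author's own statement) =====
-- stated objective: faster
-- what changed: Replaced A's repeated slice-and-recurse trimming with one forward pass that records the first '(' index and the last ')' index, followed by a single slice.
import Mathlib
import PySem

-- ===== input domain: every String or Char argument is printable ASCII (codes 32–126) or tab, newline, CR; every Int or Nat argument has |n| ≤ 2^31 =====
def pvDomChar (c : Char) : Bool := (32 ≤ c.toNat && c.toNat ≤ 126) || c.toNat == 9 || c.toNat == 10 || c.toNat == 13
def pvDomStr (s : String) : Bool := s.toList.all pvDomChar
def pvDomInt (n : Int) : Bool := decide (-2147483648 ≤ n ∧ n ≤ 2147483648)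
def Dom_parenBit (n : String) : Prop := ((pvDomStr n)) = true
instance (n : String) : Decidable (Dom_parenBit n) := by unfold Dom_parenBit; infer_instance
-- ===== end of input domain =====

-- B replaces A's repeated slice-and-recurse trimming by one forward index scan plus a single
-- slice (objective: faster). On inputs with no '('..')' segment both Pythons raise IndexError;
-- Pre_ excludes exactly those.

-- ===== PORT A =====
-- A recurses on n[1:] / n[:-1]; ported over the character list.
def parenBitGo : List Char → List Char
  | [] => []  -- Python: n[0] raises IndexError on the empty string; excluded by Pre_
  | c :: rest =>
      if c = '(' ∧ (c :: rest).getLast (List.cons_ne_nil c rest) = ')' then c :: rest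
      else if c ≠ '(' then parenBitGo rest          -- return parenBit(n[1:])
      else parenBitGo (c :: rest).dropLast          -- here n[-1] != ')' holds: return parenBit(n[:-1])
termination_by l => l.length
decreasing_by all_goals (simp; try omega)

def parenBit (n : String) : String := String.ofList (parenBitGo n.toList)

-- ===== PORT B =====
-- one pass over enumerate(n), maintaining (first, last), both initialised to -1
def altScan : List Char → Int → Int × Int → Int × Int
  | [], _, fl => fl
  | c :: rest, k, (first, last) =>
      altScan rest (k + 1)
        (if c = '(' ∧ first < 0 then k else first,
         if c = ')' then k else last)

def parenBit_alt (n : String) : String :=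
  let fl := altScan n.toList 0 (-1, -1)
  if fl.1 < 0 ∨ fl.2 ≤ fl.1 then ""  -- Python: raise IndexError; excluded by Pre_
  else String.ofList (PySem.List.slice n.toList (some fl.1) (some (fl.2 + 1)))

-- ===== PRECONDITION & SPEC =====
-- Pre_ = exactly the inputs on which A returns: n contains a '(' with some ')' after it
-- (otherwise A's recursion reaches the empty string and n[0] raises IndexError).
def Pre_parenBit (n : String) : Prop :=
  '(' ∈ n.toList ∧ ')' ∈ n.toList ∧
    n.toList.idxOf '(' + n.toList.reverse.idxOf ')' + 1 < n.toList.length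

instance (n : String) : Decidable (Pre_parenBit n) := by unfold Pre_parenBit; infer_instance

def pvWitness_parenBit : String := "a(b)c"

def Spec_parenBit (n : String) (out : String) : Prop := out = parenBit_alt n
instance (n : String) (out : String) : Decidable (Spec_parenBit n out) := by unfold Spec_parenBit; infer_instance

-- ===== CLAIM (what is proved, stated in full; the proofs are below) =====
def Claim_equal_parenBit : Prop := ∀ (n : String), Dom_parenBit n → Pre_parenBit n → Spec_parenBit n (parenBit n)

-- ===== LEMMAS AND PROOFS =====

-- index (from the front) of the LAST ')' in l
def lastIdx (l : List Char) : Nat := l.length - 1 - l.reverse.idxOf ')'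

-- the scan's first component is the index of the first '(' (k = running offset)
lemma altScan_fst (l : List Char) : ∀ (k first last : Int), 0 ≤ k →
    (altScan l k (first, last)).1 =
      if first < 0 ∧ '(' ∈ l then k + (l.idxOf '(' : Int) else first := by
  induction l with
  | nil => intro k first last _; simp [altScan]
  | cons c rest ih =>
      intro k first last hk
      simp only [altScan]
      rw [ih _ _ _ (by omega)]
      by_cases hc : c = '('
      · subst hc
        by_cases hf : first < 0
        · have hk' : ¬ (k < 0) := not_lt.mpr hk
          simp [hf, hk', List.idxOf_cons_self]
        · simp [hf]
      · have hmm : ('(' : Char) ∈ c :: rest ↔ '(' ∈ rest := by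
          simp [List.mem_cons]
          intro h; exact absurd h.symm hc
        have hix : List.idxOf '(' (c :: rest) = List.idxOf '(' rest + 1 :=
          List.idxOf_cons_ne _ hc
        simp only [hc, false_and, if_false, hmm, hix]
        split_ifs with h
        · push_cast; ring
        · rfl

lemma lastIdx_cons_of_mem (c : Char) (rest : List Char) (h : ')' ∈ rest) :
    lastIdx (c :: rest) = lastIdx rest + 1 := by
  have hm : ')' ∈ rest.reverse := by simpa using h
  have hlt : rest.reverse.idxOf ')' < rest.reverse.length := List.idxOf_lt_length_of_mem hm
  have hidx : (c :: rest).reverse.idxOf ')' = rest.reverse.idxOf ')' := by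
    rw [List.reverse_cons, List.idxOf_append_of_mem hm]
  unfold lastIdx
  rw [hidx]
  simp only [List.length_cons, List.length_reverse] at *
  omega

lemma lastIdx_cons_of_not_mem (rest : List Char) (h : ')' ∉ rest) :
    lastIdx (')' :: rest) = 0 := by
  have hm : ')' ∉ rest.reverse := by simpa using h
  have hidx : ((')' : Char) :: rest).reverse.idxOf ')' = rest.reverse.length + List.idxOf ')' [')'] := by
    rw [List.reverse_cons, List.idxOf_append_of_notMem hm]
  unfold lastIdx
  rw [hidx]
  simp

-- the scan's second component is the index of the last ')'
lemma altScan_snd (l : List Char) : ∀ (k first last : Int),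
    (altScan l k (first, last)).2 =
      if ')' ∈ l then k + (lastIdx l : Int) else last := by
  induction l with
  | nil => intro k first last; simp [altScan]
  | cons c rest ih =>
      intro k first last
      simp only [altScan]
      rw [ih]
      by_cases hm : ')' ∈ rest
      · rw [if_pos hm, if_pos (List.mem_cons_of_mem c hm), lastIdx_cons_of_mem c rest hm]
        push_cast; ring
      · rw [if_neg hm]
        by_cases hc : c = ')'
        · subst hc
          rw [if_pos rfl, if_pos List.mem_cons_self, lastIdx_cons_of_not_mem rest hm]
          simp
        · have : ')' ∉ c :: rest := by
            intro h
            rcases List.mem_cons.mp h with h | h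
            · exact hc h.symm
            · exact hm h
          rw [if_neg this, if_neg hc]

lemma idxOf_reverse_eq_zero (l : List Char) (hne : l ≠ []) (h : l.getLast hne = ')') :
    l.reverse.idxOf ')' = 0 := by
  have hh : l.reverse.head? = some ')' := by
    rw [List.head?_reverse, List.getLast?_eq_some_getLast hne, h]
  cases hrev : l.reverse with
  | nil => rw [hrev] at hh; simp at hh
  | cons x xs =>
      rw [hrev] at hh
      simp at hh
      subst hh
      exact List.idxOf_cons_self

-- A's recursion computes the slice from the first '(' to the last ')'
lemma parenBitGo_eq : ∀ (l : List Char),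
    '(' ∈ l → ')' ∈ l → l.idxOf '(' + l.reverse.idxOf ')' + 1 < l.length →
    parenBitGo l = (l.drop (l.idxOf '(')).take (lastIdx l + 1 - l.idxOf '(') := by
  intro l
  induction l using parenBitGo.induct with
  | case1 =>
      intro h1 _ _
      simp at h1
  | case2 c rest hif =>
      intro h1 h2 h3
      obtain ⟨hc, hlast⟩ := hif
      subst hc
      have hrz : (('(' : Char) :: rest).reverse.idxOf ')' = 0 :=
        idxOf_reverse_eq_zero _ (List.cons_ne_nil _ _) hlast
      have hiz : List.idxOf '(' (('(' : Char) :: rest) = 0 := List.idxOf_cons_self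
      rw [parenBitGo, if_pos ⟨rfl, hlast⟩, hiz]
      unfold lastIdx
      rw [hrz]
      simp
  | case3 c rest hif hc ih =>
      intro h1 h2 h3
      have hne : c ≠ '(' := hc
      have hm1 : '(' ∈ rest := by
        rcases List.mem_cons.mp h1 with h | h
        · exact absurd h.symm hne
        · exact h
      have hidx : List.idxOf '(' (c :: rest) = List.idxOf '(' rest + 1 :=
        List.idxOf_cons_ne _ hne
      have hm2 : ')' ∈ rest := by
        by_contra hnm
        have hcp : c = ')' := by
          rcases List.mem_cons.mp h2 with h | h
          · exact h.symm
          · exact absurd h hnm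
        subst hcp
        have hmrev : ')' ∉ rest.reverse := by simpa using hnm
        have hrr : ((')' : Char) :: rest).reverse.idxOf ')' = rest.reverse.length + List.idxOf ')' [')'] := by
          rw [List.reverse_cons, List.idxOf_append_of_notMem hmrev]
        have hz : List.idxOf ')' [')'] = 0 := List.idxOf_cons_self
        rw [hidx, hrr, hz] at h3
        simp only [List.length_cons, List.length_reverse] at h3
        omega
      have hmrev2 : ')' ∈ rest.reverse := by simpa using hm2
      have hridx : (c :: rest).reverse.idxOf ')' = rest.reverse.idxOf ')' := by
        rw [List.reverse_cons, List.idxOf_append_of_mem hmrev2]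
      have h3' : rest.idxOf '(' + rest.reverse.idxOf ')' + 1 < rest.length := by
        rw [hidx, hridx] at h3
        simp at h3
        omega
      rw [parenBitGo, if_neg hif, if_pos hc, ih hm1 hm2 h3',
        hidx, lastIdx_cons_of_mem c rest hm2]
      rw [List.drop_succ_cons]
      congr 1
      omega
  | case4 c rest hif hc ih =>
      intro h1 h2 h3
      simp only [Decidable.not_not] at hc
      subst hc
      have hlast : (('(' : Char) :: rest).getLast (List.cons_ne_nil _ _) ≠ ')' := by
        intro h; exact hif ⟨rfl, h⟩
      set l := ('(' : Char) :: rest with hl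
      have hlne : l ≠ [] := List.cons_ne_nil _ _
      have hiz : List.idxOf '(' l = 0 := List.idxOf_cons_self
      have hsplit : l.dropLast ++ [l.getLast hlne] = l := List.dropLast_append_getLast hlne
      have hrev : l.reverse = l.getLast hlne :: l.dropLast.reverse := by
        conv_lhs => rw [← hsplit]
        simp
      have hner : (l.getLast hlne) ≠ ')' := hlast
      have hridx : l.reverse.idxOf ')' = l.dropLast.reverse.idxOf ')' + 1 := by
        rw [hrev, List.idxOf_cons_ne _ hner]
      have hmt : ')' ∈ l.dropLast.reverse := by
        have hml : ')' ∈ l.reverse := by simpa using h2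
        rw [hrev] at hml
        rcases List.mem_cons.mp hml with h | h
        · exact absurd h.symm hner
        · exact h
      have hm2' : ')' ∈ l.dropLast := by simpa using hmt
      have hrlt : l.dropLast.reverse.idxOf ')' < l.dropLast.length := by
        have := List.idxOf_lt_length_of_mem hmt
        simpa using this
      have hdlen : l.dropLast.length = l.length - 1 := by simp
      have hlen2 : 2 ≤ l.length := by
        rw [hiz, hridx] at h3
        omega
      obtain ⟨r, rs, hrest⟩ : ∃ r rs, rest = r :: rs := by
        cases rest with
        | nil => simp [hl] at hlen2
        | cons r rs => exact ⟨r, rs, rfl⟩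
      have hdl : l.dropLast = '(' :: (r :: rs).dropLast := by
        rw [hl, hrest]
        exact List.dropLast_cons₂ ..
      have hm1' : '(' ∈ l.dropLast := by rw [hdl]; exact List.mem_cons_self
      have hiz' : List.idxOf '(' l.dropLast = 0 := by rw [hdl]; exact List.idxOf_cons_self
      have h3' : l.dropLast.idxOf '(' + l.dropLast.reverse.idxOf ')' + 1 < l.dropLast.length := by
        rw [hiz', hdlen]
        rw [hiz, hridx] at h3
        omega
      have hli : lastIdx l.dropLast = lastIdx l := by
        unfold lastIdx
        rw [hdlen, hridx]
        omega
      rw [parenBitGo, if_neg hif, if_neg (by simp), ih hm1' hm2' h3', hiz', hiz, hli]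
      simp only [List.drop_zero, Nat.sub_zero]
      rw [List.dropLast_eq_take, List.take_take]
      congr 1
      have : l.reverse.idxOf ')' < l.length := by
        have := List.idxOf_lt_length_of_mem (show (')' : Char) ∈ l.reverse by simpa using h2)
        simpa using this
      unfold lastIdx
      omega

-- ===== VERDICT (by name: the statement is the Claim_ definition above) =====
theorem parenBit_spec : Claim_equal_parenBit := by
  intro n _ hpre
  obtain ⟨h1, h2, h3⟩ := hpre
  unfold Spec_parenBit parenBit parenBit_alt
  set l := n.toList with hl
  set i := l.idxOf '(' with hi
  set j := lastIdx l with hj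
  have hfst : (altScan l 0 (-1, -1)).1 = (i : Int) := by
    rw [altScan_fst l 0 (-1) (-1) le_rfl]
    simp [h1, hi]
  have hsnd : (altScan l 0 (-1, -1)).2 = (j : Int) := by
    rw [altScan_snd]
    simp [h2, hj]
  have hrlt : l.reverse.idxOf ')' < l.length := by
    have := List.idxOf_lt_length_of_mem (show (')' : Char) ∈ l.reverse by simpa using h2)
    simpa using this
  have hij : i < j := by
    rw [hj]
    unfold lastIdx
    omega
  simp only [hfst, hsnd]
  rw [if_neg (by omega)]
  have hcast : ((j : Int) + 1) = ((j + 1 : Nat) : Int) := by push_cast; ring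
  rw [hcast, PySem.List.slice_natCast, parenBitGo_eq l h1 h2 h3]
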